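-- pv_equiv track=rewrite | github.com/sibosop/sibcommon | utils.py | sysex_to_data
-- ===== SOURCE A (Python) =====
-- def sysex_to_data(sysex):
--   data = [None] * len(sysex)
--   cnt2 = 0
--   bits = 0
--   for cnt in range(0,len(sysex)):
--     if ((cnt % 8) == 0):
--       bits = sysex[cnt]
--     else:
--       data[cnt2] = sysex[cnt] | ((bits & 1) << 7)
--       cnt2 += 1
--       bits >>= 1
--   return data[0:cnt2]
-- ===== SOURCE B (Python) =====
-- def sysex_to_data(sysex):
--     data = []
--     for i in range(0, len(sysex), 8):
--         header = sysex[i]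
--         for j, b in enumerate(sysex[i+1:i+8]):
--             data.append(b | (((header >> j) & 1) << 7))
--     return data
-- ===== Notes on version B (the rewrite author's own statement) =====
-- stated objective: simpler
-- what changed: Replaces A's flat index loop with cnt%8 dispatch, a mutated bits register, a preallocated None list, a separate output counter and a final slice by a nested block traversal: an outer loop over 8-byte blocks that reads the header once and an inner enumerate over the up-to-7 data bytes of the block, appending each decoded byte directly.
import Mathlib
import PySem

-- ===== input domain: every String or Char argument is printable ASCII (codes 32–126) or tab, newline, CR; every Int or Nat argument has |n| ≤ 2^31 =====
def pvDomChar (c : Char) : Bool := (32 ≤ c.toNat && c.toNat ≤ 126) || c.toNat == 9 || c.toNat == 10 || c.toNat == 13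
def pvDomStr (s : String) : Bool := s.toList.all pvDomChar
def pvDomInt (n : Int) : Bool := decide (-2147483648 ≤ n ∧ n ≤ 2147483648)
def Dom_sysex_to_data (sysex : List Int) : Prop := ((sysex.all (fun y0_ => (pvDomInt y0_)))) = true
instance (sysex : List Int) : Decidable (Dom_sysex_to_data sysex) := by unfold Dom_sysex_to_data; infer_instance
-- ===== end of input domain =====

-- B replaces A's flat cnt%8-dispatch loop (preallocated list, output counter, mutated bits register,
-- final slice) by a nested traversal over 8-byte blocks, appending each decoded byte directly: simpler.

-- ===== PORT A =====
-- Python's `[None] * len(sysex)` is modelled as a list of 0-placeholders: every cell the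
-- function returns has been overwritten first, so the placeholder value is never observed.
def sysex_to_data (sysex : List Int) : List Int :=
  let st :=
    (PySem.List.pyRange 0 (sysex.length : Int) 1).foldl
      (fun (st : List Int × Int × Int) cnt =>
        if PySem.Int.mod cnt 8 = 0 then
          (st.1, st.2.1, PySem.List.pyGetD sysex cnt 0)
        else
          (PySem.List.pySetD st.1 st.2.1
             (PySem.Int.bor (PySem.List.pyGetD sysex cnt 0) ((PySem.Int.band st.2.2 1) <<< 7)),
           st.2.1 + 1, st.2.2 >>> 1))
      (List.replicate sysex.length 0, 0, 0)
  PySem.List.slice st.1 (some 0) (some st.2.1)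

-- ===== PORT B =====
-- `header >> j`: the enumerate index j is always ≥ 0, so `.toNat` is exact here.
def sysex_to_data_alt (sysex : List Int) : List Int :=
  (PySem.List.pyRange 0 (sysex.length : Int) 8).foldl
    (fun data i =>
      let header := PySem.List.pyGetD sysex i 0
      (PySem.List.enumerate (PySem.List.slice sysex (some (i + 1)) (some (i + 8)))).foldl
        (fun data jb =>
          data ++ [PySem.Int.bor jb.2 ((PySem.Int.band (header >>> jb.1.toNat) 1) <<< 7)])
        data)
    []

-- ===== PRECONDITION & SPEC =====
def Spec_sysex_to_data (sysex : List Int) (out : List Int) : Prop := out = sysex_to_data_alt sysex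
instance (sysex : List Int) (out : List Int) : Decidable (Spec_sysex_to_data sysex out) := by unfold Spec_sysex_to_data; infer_instance

-- ===== CLAIM (what is proved, stated in full; the proofs are below) =====
def Claim_equal_sysex_to_data : Prop := ∀ (sysex : List Int), Dom_sysex_to_data sysex → Spec_sysex_to_data sysex (sysex_to_data sysex)

-- ===== LEMMAS AND PROOFS =====

-- Reference decoder for one block: the data bytes `bs` under header `h`, LSB first.
def pvDecode (h : Int) : List Int → List Int
  | [] => []
  | b :: r => PySem.Int.bor b ((PySem.Int.band h 1) <<< 7) :: pvDecode (h >>> 1) r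

-- Reference result: the input in chunks of 8 (1 header + up to 7 data bytes).
def pvChunks : List Int → List Int
  | [] => []
  | h :: t => pvDecode h (t.take 7) ++ pvChunks (t.drop 7)
  termination_by l => l.length
  decreasing_by simp

theorem pvChunks_nil : pvChunks [] = [] := by rw [pvChunks]

theorem pvChunks_cons (h : Int) (t : List Int) :
    pvChunks (h :: t) = pvDecode h (t.take 7) ++ pvChunks (t.drop 7) := by rw [pvChunks]

theorem pvDecode_length (h : Int) (bs : List Int) : (pvDecode h bs).length = bs.length := by
  induction bs generalizing h with
  | nil => rfl
  | cons b r ih => simp [pvDecode, ih]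

-- A's loop body, as a function of the (data, cnt2, bits) state and the (index, value) pair.
def pvStepA (st : List Int × Int × Int) (p : Int × Int) : List Int × Int × Int :=
  if PySem.Int.mod p.1 8 = 0 then
    (st.1, st.2.1, p.2)
  else
    (PySem.List.pySetD st.1 st.2.1
       (PySem.Int.bor p.2 ((PySem.Int.band st.2.2 1) <<< 7)),
     st.2.1 + 1, st.2.2 >>> 1)

theorem pvA_inner (bs : List Int) :
    ∀ (s : Int) (out pad : List Int) (b0 : Int),
    bs.length ≤ pad.length →
    (∀ j : Nat, j < bs.length → PySem.Int.mod (s + j) 8 ≠ 0) →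
    ∃ b1, (PySem.List.enumerate bs s).foldl (pvStepA) (out ++ pad, (out.length : Int), b0)
      = (out ++ pvDecode b0 bs ++ pad.drop bs.length,
         ((out.length + bs.length : Nat) : Int), b1) := by
  induction bs with
  | nil => intro s out pad b0 _ _; exact ⟨b0, by simp [PySem.List.enumerate, pvDecode]⟩
  | cons b r ih =>
    intro s out pad b0 hlen hmod
    obtain ⟨p, pt, rfl⟩ : ∃ p pt, pad = p :: pt := by
      cases pad with
      | nil => simp at hlen
      | cons p pt => exact ⟨p, pt, rfl⟩
    rw [PySem.List.enumerate_cons, List.foldl_cons]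
    have hs : PySem.Int.mod s 8 ≠ 0 := by
      have := hmod 0 (by simp); simpa using this
    have hset : (out ++ p :: pt).set out.length
        (PySem.Int.bor b ((PySem.Int.band b0 1) <<< 7)) =
        (out ++ [PySem.Int.bor b ((PySem.Int.band b0 1) <<< 7)]) ++ pt := by
      rw [List.set_append]; simp
    have hstep : pvStepA (out ++ p :: pt, (out.length : Int), b0) (s, b) =
        ((out ++ [PySem.Int.bor b ((PySem.Int.band b0 1) <<< 7)]) ++ pt,
         (((out ++ [PySem.Int.bor b ((PySem.Int.band b0 1) <<< 7)]).length : Nat) : Int),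
         b0 >>> 1) := by
      simp only [pvStepA, if_neg hs]
      rw [show ((out.length : Int)) = ((out.length : Nat) : Int) from rfl,
          PySem.List.pySetD_natCast, hset]
      simp
    rw [hstep]
    obtain ⟨b1, hrec⟩ := ih (s + 1) (out ++ [PySem.Int.bor b ((PySem.Int.band b0 1) <<< 7)]) pt
      (b0 >>> 1) (by simpa using hlen)
      (by intro j hj
          have := hmod (j + 1) (by simpa using Nat.succ_lt_succ hj)
          have harith : s + ((j : Int) + 1) = s + 1 + (j : Int) := by ring
          simpa [harith] using this)
    refine ⟨b1, ?_⟩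
    rw [hrec]
    simp [pvDecode]
    omega

theorem pvA_outer (n : Nat) :
    ∀ (l : List Int) (out pad : List Int) (k : Nat) (b0 : Int),
    l.length ≤ n → l.length ≤ pad.length →
    ∃ b1, (PySem.List.enumerate l ((8 * k : Nat) : Int)).foldl (pvStepA)
        (out ++ pad, (out.length : Int), b0)
      = (out ++ pvChunks l ++ pad.drop (pvChunks l).length,
         ((out.length + (pvChunks l).length : Nat) : Int), b1) := by
  induction n with
  | zero =>
    intro l out pad k b0 hn _
    have : l = [] := List.eq_nil_of_length_eq_zero (Nat.le_zero.mp hn)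
    subst this
    exact ⟨b0, by simp [PySem.List.enumerate, pvChunks_nil]⟩
  | succ n ih =>
    intro l out pad k b0 hn hlen
    cases l with
    | nil => exact ⟨b0, by simp [PySem.List.enumerate, pvChunks_nil]⟩
    | cons h t =>
      rw [PySem.List.enumerate_cons, List.foldl_cons]
      have hmod0 : PySem.Int.mod ((8 * k : Nat) : Int) 8 = 0 := by
        rw [PySem.Int.mod_eq_zero_iff_dvd]
        exact ⟨(k : Int), by push_cast; ring⟩
      have hstep : pvStepA (out ++ pad, (out.length : Int), b0) (((8 * k : Nat) : Int), h)
          = (out ++ pad, (out.length : Int), h) := by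
        simp only [pvStepA, if_pos hmod0]
      rw [hstep]
      -- split t into this block's data bytes and the rest
      have hsplit : PySem.List.enumerate t (((8 * k : Nat) : Int) + 1)
          = PySem.List.enumerate (t.take 7) (((8 * k : Nat) : Int) + 1)
            ++ PySem.List.enumerate (t.drop 7)
                ((((8 * k : Nat) : Int) + 1) + ((t.take 7).length : Int)) := by
        conv_lhs => rw [← List.take_append_drop 7 t]
        rw [PySem.List.enumerate_append]
      rw [hsplit, List.foldl_append]
      have htk : (t.take 7).length ≤ pad.length := by
        simp at hlen ⊢; omega
      have hmodin : ∀ j : Nat, j < (t.take 7).length →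
          PySem.Int.mod (((8 * k : Nat) : Int) + 1 + j) 8 ≠ 0 := by
        intro j hj
        have hj7 : j < 7 := lt_of_lt_of_le hj (by simp)
        rw [PySem.Int.mod_eq_emod_of_pos (by norm_num)]
        push_cast
        omega
      obtain ⟨bmid, hmid⟩ := pvA_inner (t.take 7) (((8 * k : Nat) : Int) + 1) out pad h htk
        (by intro j hj; have := hmodin j hj; simpa using this)
      rw [hmid]
      by_cases hle : t.length ≤ 7
      · have hdrop7 : t.drop 7 = [] := by simp; omega
        refine ⟨bmid, ?_⟩
        rw [hdrop7]
        simp [PySem.List.enumerate, pvChunks_cons, hdrop7, pvChunks_nil, pvDecode_length]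
      · -- a full block; recurse on the rest starting at index 8*(k+1)
        have htk7 : (t.take 7).length = 7 := by simp; omega
        have hstart : ((8 * k : Nat) : Int) + 1 + ((t.take 7).length : Int)
            = ((8 * (k + 1) : Nat) : Int) := by
          rw [htk7]; push_cast; ring
        rw [hstart]
        have hcast : ((out.length + (t.take 7).length : Nat) : Int)
            = (((out ++ pvDecode h (t.take 7)).length : Nat) : Int) := by
          simp [pvDecode_length]
        rw [show (out ++ pvDecode h (t.take 7) ++ pad.drop (t.take 7).length)
              = ((out ++ pvDecode h (t.take 7)) ++ pad.drop 7) by rw [htk7],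
            hcast]
        obtain ⟨b1, hrec⟩ := ih (t.drop 7) (out ++ pvDecode h (t.take 7)) (pad.drop 7)
          (k + 1) bmid (by simp at hn ⊢; omega) (by simp at hlen ⊢; omega)
        refine ⟨b1, ?_⟩
        rw [hrec]
        simp [pvChunks_cons, pvDecode_length, List.drop_drop]
        constructor
        · congr 1; omega
        · omega

theorem pvA_eq_chunks (sysex : List Int) : sysex_to_data sysex = pvChunks sysex := by
  unfold sysex_to_data
  have hfold :
      (PySem.List.pyRange 0 (sysex.length : Int) 1).foldl
        (fun (st : List Int × Int × Int) cnt =>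
          if PySem.Int.mod cnt 8 = 0 then
            (st.1, st.2.1, PySem.List.pyGetD sysex cnt 0)
          else
            (PySem.List.pySetD st.1 st.2.1
               (PySem.Int.bor (PySem.List.pyGetD sysex cnt 0) ((PySem.Int.band st.2.2 1) <<< 7)),
             st.2.1 + 1, st.2.2 >>> 1))
        (List.replicate sysex.length 0, 0, 0)
      = (PySem.List.enumerate sysex 0).foldl (pvStepA)
          (List.replicate sysex.length 0, 0, 0) := by
    rw [PySem.List.enumerate_eq_map_pyRange sysex 0, List.foldl_map]
    rfl
  rw [hfold]
  obtain ⟨b1, hres⟩ := pvA_outer sysex.length sysex [] (List.replicate sysex.length 0) 0 0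
    le_rfl (by simp)
  norm_num at hres
  simp only [hres]
  rw [PySem.List.slice_zero_start, PySem.List.slice_to _ (Int.natCast_nonneg _)]
  simp [List.take_left']

theorem int_shiftRight_zero (h : Int) : h >>> (0 : Nat) = h := by
  cases h <;> simp

theorem pyRange8_nil (a b : Int) (h : b ≤ a) : PySem.List.pyRange a b 8 = [] := by
  rw [PySem.List.pyRange_of_pos a b (by norm_num), if_neg (by omega)]
  simp

theorem pyRange8_cons (a b : Int) (h : a < b) :
    PySem.List.pyRange a b 8 = a :: PySem.List.pyRange (a + 8) b 8 := by
  rw [PySem.List.pyRange_of_pos a b (by norm_num),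
      PySem.List.pyRange_of_pos (a + 8) b (by norm_num)]
  by_cases h8 : a + 8 < b
  · rw [if_pos h, if_pos h8,
        show ((b - a + 8 - 1) / 8).toNat = ((b - (a + 8) + 8 - 1) / 8).toNat + 1 from by omega,
        List.range_succ_eq_map, List.map_cons, List.map_map]
    refine congrArg₂ _ (by norm_num) (List.map_congr_left ?_)
    intro x _
    simp only [Function.comp_apply]
    push_cast
    ring
  · rw [if_pos h, if_neg h8,
        show ((b - a + 8 - 1) / 8).toNat = 1 from by omega]
    simp

-- B's inner loop over one block's data bytes is the reference decoder
theorem pvB_decode (h : Int) (bs : List Int) :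
    ∀ (s : Nat) (acc : List Int),
    (PySem.List.enumerate bs (s : Int)).foldl
      (fun data jb => data ++ [PySem.Int.bor jb.2 ((PySem.Int.band (h >>> jb.1.toNat) 1) <<< 7)])
      acc
    = acc ++ pvDecode (h >>> s) bs := by
  induction bs with
  | nil => intro s acc; simp [PySem.List.enumerate, pvDecode]
  | cons b r ih =>
    intro s acc
    rw [PySem.List.enumerate_cons, List.foldl_cons,
        show ((s : Int) + 1) = ((s + 1 : Nat) : Int) from by push_cast; ring, ih (s + 1)]
    have hsh : h >>> s >>> (1 : Int) = h >>> (s + 1) := by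
      rw [show (1 : Int) = ((1 : Nat) : Int) from rfl, Int.shiftRight_natCast_right,
          ← Int.shiftRight_add]
    simp [pvDecode, hsh, Int.shiftRight_natCast_right]

-- B's outer loop from block k onwards
theorem pvB_outer (sysex : List Int) (n : Nat) :
    ∀ (k : Nat) (acc : List Int), sysex.length ≤ n + 8 * k →
    (PySem.List.pyRange ((8 * k : Nat) : Int) (sysex.length : Int) 8).foldl
      (fun data i =>
        (PySem.List.enumerate (PySem.List.slice sysex (some (i + 1)) (some (i + 8)))).foldl
          (fun data jb => data ++ [PySem.Int.bor jb.2
             ((PySem.Int.band ((PySem.List.pyGetD sysex i 0) >>> jb.1.toNat) 1) <<< 7)]) data)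
      acc
    = acc ++ pvChunks (sysex.drop (8 * k)) := by
  induction n with
  | zero =>
    intro k acc hbound
    rw [pyRange8_nil _ _ (by omega)]
    have : sysex.drop (8 * k) = [] := by simp; omega
    simp [this, pvChunks_nil]
  | succ n ih =>
    intro k acc hbound
    by_cases hlt : 8 * k < sysex.length
    · rw [pyRange8_cons _ _ (by omega)]
      simp only [List.foldl_cons]
      have hsl : PySem.List.slice sysex (some (((8 * k : Nat) : Int) + 1))
            (some (((8 * k : Nat) : Int) + 8))
          = (sysex.drop (8 * k + 1)).take 7 := by
        rw [PySem.List.slice_toNat sysex (by positivity) (by positivity),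
            show ((((8 * k : Nat) : Int)) + 1).toNat = 8 * k + 1 from by omega,
            show ((((8 * k : Nat) : Int)) + 8).toNat = 8 * k + 8 from by omega,
            show 8 * k + 8 - (8 * k + 1) = 7 from by omega]
      rw [hsl]
      have hdec := pvB_decode (PySem.List.pyGetD sysex ((8 * k : Nat) : Int) 0)
        ((sysex.drop (8 * k + 1)).take 7) 0 acc
      simp only [Nat.cast_zero, int_shiftRight_zero] at hdec
      rw [hdec,
          show (((8 * k : Nat) : Int) + 8) = ((8 * (k + 1) : Nat) : Int) from by push_cast; ring,
          ih (k + 1) _ (by omega)]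
      have hget : PySem.List.pyGetD sysex ((8 * k : Nat) : Int) 0 = sysex[8 * k] := by
        rw [PySem.List.pyGetD_natCast, List.getD_eq_getElem _ _ hlt]
      rw [hget, List.drop_eq_getElem_cons hlt, pvChunks_cons, List.drop_drop,
          show 8 * k + 1 + 7 = 8 * (k + 1) from by omega]
      simp
    · rw [pyRange8_nil _ _ (by omega)]
      have : sysex.drop (8 * k) = [] := by simp; omega
      simp [this, pvChunks_nil]

theorem pvB_eq_chunks (sysex : List Int) : sysex_to_data_alt sysex = pvChunks sysex := by
  unfold sysex_to_data_alt
  have h := pvB_outer sysex sysex.length 0 [] (by omega)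
  simp only [Nat.mul_zero, Nat.cast_zero, List.nil_append, List.drop_zero] at h
  exact h

-- ===== VERDICT (by name: the statement is the Claim_ definition above) =====
theorem sysex_to_data_spec : Claim_equal_sysex_to_data := by
  intro sysex _
  unfold Spec_sysex_to_data
  rw [pvA_eq_chunks, pvB_eq_chunks]
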